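-- pv_equiv track=rewrite | github.com/HarshaAkasam/LabPrograms | 5th-Sem/Machine Learning/week2_candidate_elimination.py | more_general
-- ===== SOURCE A (Python) =====
-- def more_general(a,b):
--     more=False
--     for x,y in zip(a,b):
--         if x=='?':
--             if y!='?': more=True
--         elif x!=y:
--             return False
--     return more
-- ===== SOURCE B (Python) =====
-- def more_general(a, b):
--     # a is strictly more general than b  <=>  a generalizes b on the compared
--     # prefix AND the two prefixes are not identical.
--     n = min(len(a), len(b))
--     ta, tb = a[:n], b[:n]
--     return all(x == '?' or x == y for x, y in zip(ta, tb)) and ta != tb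
-- ===== Notes on version B (the rewrite author's own statement) =====
-- stated objective: alternative
-- what changed: Replaces A's flag-accumulating loop by a different characterization: a is strictly more general than b iff a covers b positionwise (every entry is '?' or equal) and the truncated lists are not identical, so the 'strictness' flag becomes a structural list comparison.
import Mathlib
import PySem

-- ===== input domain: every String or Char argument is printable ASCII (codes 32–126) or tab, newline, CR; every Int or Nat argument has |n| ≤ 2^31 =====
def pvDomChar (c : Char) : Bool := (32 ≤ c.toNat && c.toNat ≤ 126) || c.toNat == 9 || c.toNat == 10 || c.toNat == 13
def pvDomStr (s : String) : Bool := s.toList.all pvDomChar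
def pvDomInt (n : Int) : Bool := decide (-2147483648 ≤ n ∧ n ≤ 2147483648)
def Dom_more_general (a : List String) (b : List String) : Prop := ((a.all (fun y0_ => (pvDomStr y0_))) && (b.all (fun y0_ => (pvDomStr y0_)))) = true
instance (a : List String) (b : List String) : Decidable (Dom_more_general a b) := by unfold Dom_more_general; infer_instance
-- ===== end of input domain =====

-- B uses a different characterization: a is strictly more general than b iff a covers b
-- positionwise and the compared prefixes are not identical lists; objective: alternative.
-- ===== PORT A =====
def more_generalLoop : List (String × String) → Bool → Bool
  | [], more => more
  | (x, y) :: rest, more =>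
    if x = "?" then
      more_generalLoop rest (if y ≠ "?" then true else more)
    else if x ≠ y then false
    else more_generalLoop rest more

def more_general (a : List String) (b : List String) : Bool :=
  more_generalLoop (a.zip b) false

-- ===== PORT B =====
def more_general_alt (a : List String) (b : List String) : Bool :=
  let n := min a.length b.length
  let ta := a.take n
  let tb := b.take n
  (ta.zip tb).all (fun p => p.1 == "?" || p.1 == p.2) && (ta != tb)

-- ===== PRECONDITION & SPEC =====
def Spec_more_general (a : List String) (b : List String) (out : Bool) : Prop := out = more_general_alt a b
instance (a : List String) (b : List String) (out : Bool) : Decidable (Spec_more_general a b out) := by unfold Spec_more_general; infer_instance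

-- ===== CLAIM (what is proved, stated in full; the proofs are below) =====
def Claim_equal_more_general : Prop := ∀ (a : List String) (b : List String), Dom_more_general a b → Spec_more_general a b (more_general a b)

-- ===== LEMMAS AND PROOFS =====

lemma loop_char (l : List (String × String)) (more : Bool) :
    more_generalLoop l more =
      if l.any (fun p => p.1 != "?" && p.1 != p.2) then false
      else (more || l.any (fun p => p.1 == "?" && p.2 != "?")) := by
  induction l generalizing more with
  | nil => simp [more_generalLoop]
  | cons hd tl ih =>
    obtain ⟨x, y⟩ := hd
    by_cases hx : x = "?"
    · subst hx
      by_cases hy : y = "?" <;> simp [more_generalLoop, ih, hy]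
    · by_cases hxy : x = y
      · subst hxy
        simp [more_generalLoop, hx, ih, bne]
      · simp [more_generalLoop, hx, hxy]

lemma any_congr_mem {α : Type} (l : List α) (p q : α → Bool)
    (h : ∀ x ∈ l, p x = q x) : l.any p = l.any q := by
  induction l with
  | nil => rfl
  | cons x t ih =>
    simp only [List.any_cons, h x (List.mem_cons_self), ih fun y hy => h y (List.mem_cons_of_mem x hy)]

-- lists of equal length are unequal iff some zipped pair differs
lemma ne_iff_zip_any (l1 l2 : List String) (h : l1.length = l2.length) :
    (l1 ≠ l2) ↔ (l1.zip l2).any (fun p => p.1 != p.2) = true := by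
  induction l1 generalizing l2 with
  | nil =>
    cases l2 with
    | nil => simp
    | cons y t => simp at h
  | cons x t1 ih =>
    cases l2 with
    | nil => simp at h
    | cons y t2 =>
      simp only [List.length_cons, Nat.add_left_inj] at h
      by_cases hxy : x = y
      · subst hxy
        simp [ih t2 h]
      · simp [hxy]

lemma take_zip_eq (a b : List String) :
    (a.take (min a.length b.length)).zip (b.take (min a.length b.length)) = a.zip b := by
  induction a generalizing b with
  | nil => simp
  | cons x t ih =>
    cases b with
    | nil => simp
    | cons y s =>
      simp [Nat.succ_min_succ, ih s]

-- ===== VERDICT (by name: the statement is the Claim_ definition above) =====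
theorem more_general_spec : Claim_equal_more_general := by
  intro a b _
  unfold Spec_more_general more_general more_general_alt
  have hzip := take_zip_eq a b
  show more_generalLoop (a.zip b) false =
    ((((a.take (min a.length b.length)).zip (b.take (min a.length b.length))).all
        fun p => p.1 == "?" || p.1 == p.2) &&
      (a.take (min a.length b.length) != b.take (min a.length b.length)))
  have hlen : (a.take (min a.length b.length)).length = (b.take (min a.length b.length)).length := by
    simp
  rw [loop_char, hzip, Bool.false_or]
  by_cases hbad : (a.zip b).any (fun p => p.1 != "?" && p.1 != p.2) = true
  · -- some pair has x ≠ '?' and x ≠ y: both sides false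
    rcases List.any_eq_true.mp hbad with ⟨p, hp, hpp⟩
    have hall : ((a.zip b).all fun p => p.1 == "?" || p.1 == p.2) = false := by
      rw [← Bool.not_eq_true, List.all_eq_true]
      intro hallt
      have := hallt p hp
      simp at hpp this
      tauto
    rw [hbad]
    simp [hall]
  · -- coverage holds
    rw [Bool.not_eq_true] at hbad
    rw [hbad]
    simp only [Bool.false_eq_true, if_false]
    have hall : ((a.zip b).all fun p => p.1 == "?" || p.1 == p.2) = true := by
      rw [List.all_eq_true]
      intro p hp
      by_contra hc
      have : ((a.zip b).any fun p => p.1 != "?" && p.1 != p.2) = true :=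
        List.any_eq_true.mpr ⟨p, hp, by simp at hc ⊢; tauto⟩
      rw [hbad] at this
      exact Bool.false_ne_true this
    rw [hall, Bool.true_and]
    -- under coverage the strictness flag equals "some pair differs" = prefixes differ
    have hcongr : ((a.zip b).any fun p => p.1 == "?" && p.2 != "?") =
        ((a.zip b).any fun p => p.1 != p.2) := by
      apply any_congr_mem
      intro p hp
      have hcov := List.all_eq_true.mp hall p hp
      by_cases h1 : p.1 = "?"
      · rw [h1]
        by_cases h2 : p.2 = "?"
        · rw [h2]; simp
        · simp [bne, eq_comm]
      · have h12 : p.1 = p.2 := by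
          simp only [Bool.or_eq_true, beq_iff_eq] at hcov
          tauto
        rw [← h12]
        simp [h1]
    have hne := ne_iff_zip_any _ _ hlen
    rw [hzip] at hne
    rw [hcongr]
    by_cases hd : a.take (min a.length b.length) = b.take (min a.length b.length)
    · have hfa : ((a.zip b).any fun p => p.1 != p.2) = false := by
        rw [← Bool.not_eq_true]
        intro h
        exact hne.mpr h hd
      simp [hd, hfa]
    · have hta : ((a.zip b).any fun p => p.1 != p.2) = true := hne.mp hd
      simp [hd, hta]
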